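-- pv_equiv track=rewrite | github.com/Legena/HackBulgaria | week0/day2.py | member_of_nth_fib_lists
-- ===== SOURCE A (Python) =====
-- def nth_fib_lists(listA, listB, n):
--     first = listA
--     second = listB
--     if (n <= 0):
--         return False
--     elif (n == 1):
--         return first
--     elif (n == 2):
--         return second
--     else:
--         for x in range(2, n):
--             temp = first + second
--             first = second
--             second = temp
--         return temp
--
-- def member_of_nth_fib_lists(listA, listB, needle):
--     answer = []
--     n = 1
--     while(answer != needle):
--         answer = nth_fib_lists(listA, listB, n)
--         n += 1
--         if (len(answer) > len(needle)):
--             return False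
--     return True
-- ===== SOURCE B (Python) =====
-- def member_of_nth_fib_lists(listA, listB, needle):
--     # single loop maintaining the running Fibonacci pair: no per-n rebuild
--     answer = []
--     first, second = listA, listB
--     n = 1
--     while answer != needle:
--         if n == 1:
--             answer = listA
--         elif n == 2:
--             answer = listB
--         else:
--             first, second = second, first + second
--             answer = second
--         n += 1
--         if len(answer) > len(needle):
--             return False
--     return True
-- ===== Notes on version B (the rewrite author's own statement) =====
-- stated objective: simpler
-- what changed: B drops A's nth_fib_lists helper that rebuilds the nth Fibonacci concatenation from scratch on every iteration; instead a single loop maintains the running (first, second) pair and produces each candidate with one concatenation.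
import Mathlib
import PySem

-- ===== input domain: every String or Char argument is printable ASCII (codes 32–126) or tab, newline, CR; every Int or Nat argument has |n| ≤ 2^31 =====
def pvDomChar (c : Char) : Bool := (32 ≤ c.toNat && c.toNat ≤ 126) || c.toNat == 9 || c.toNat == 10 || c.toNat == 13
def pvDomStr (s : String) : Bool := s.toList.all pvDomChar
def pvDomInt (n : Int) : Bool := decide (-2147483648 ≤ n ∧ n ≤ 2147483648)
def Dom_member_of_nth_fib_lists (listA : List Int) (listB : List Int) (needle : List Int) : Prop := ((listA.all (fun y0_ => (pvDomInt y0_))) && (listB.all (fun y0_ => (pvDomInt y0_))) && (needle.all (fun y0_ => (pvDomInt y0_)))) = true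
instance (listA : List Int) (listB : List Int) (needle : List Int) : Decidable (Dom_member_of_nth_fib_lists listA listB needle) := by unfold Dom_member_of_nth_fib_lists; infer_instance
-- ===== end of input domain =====

-- B maintains the running Fibonacci pair in the single membership loop instead of
-- recomputing the nth concatenation from scratch with a helper at every step (objective: simpler).
-- Both Python loops, when they return, do so within needle.length + 10 iterations (candidate
-- lengths grow at least like Fibonacci numbers once some input list is nonempty), so both ports
-- run their loop on that fuel; with listA = listB = [] and needle nonempty both Pythons loop
-- forever and both ports return false, so the ports still agree everywhere.

-- ===== PORT A =====
-- helper nth_fib_lists; Python returns False for n <= 0, a branch member_of_nth_fib_lists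
-- never reaches (n starts at 1): the port returns [] there.
def nth_fib_lists (listA : List Int) (listB : List Int) (n : Int) : List Int :=
  let first := listA
  let second := listB
  if n ≤ 0 then []
  else if n = 1 then first
  else if n = 2 then second
  else
    let s := (PySem.List.pyRange 2 n 1).foldl
      (fun (st : List Int × List Int × List Int) _ =>
        let temp := st.1 ++ st.2.1
        (st.2.1, temp, temp))
      (first, second, ([] : List Int))
    s.2.2

def memberLoopA (listA listB needle : List Int) : Nat → List Int → Int → Bool
  | 0, _, _ => false      -- fuel exhausted: only reached where Python A loops forever
  | fuel + 1, answer, n =>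
    if answer ≠ needle then
      let answer' := nth_fib_lists listA listB n
      if answer'.length > needle.length then false
      else memberLoopA listA listB needle fuel answer' (n + 1)
    else true

def member_of_nth_fib_lists (listA : List Int) (listB : List Int) (needle : List Int) : Bool :=
  memberLoopA listA listB needle (needle.length + 10) [] 1

-- ===== PORT B =====
def memberLoopB (listA listB needle : List Int) : Nat → List Int → List Int → List Int → Int → Bool
  | 0, _, _, _, _ => false      -- fuel exhausted: only reached where Python B loops forever
  | fuel + 1, answer, first, second, n =>
    if answer ≠ needle then
      if n = 1 then
        let answer' := listA
        if answer'.length > needle.length then false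
        else memberLoopB listA listB needle fuel answer' first second (n + 1)
      else if n = 2 then
        let answer' := listB
        if answer'.length > needle.length then false
        else memberLoopB listA listB needle fuel answer' first second (n + 1)
      else
        let second' := first ++ second
        let first' := second
        let answer' := second'
        if answer'.length > needle.length then false
        else memberLoopB listA listB needle fuel answer' first' second' (n + 1)
    else true

def member_of_nth_fib_lists_alt (listA : List Int) (listB : List Int) (needle : List Int) : Bool :=
  memberLoopB listA listB needle (needle.length + 10) [] listA listB 1

-- ===== PRECONDITION & SPEC =====
def Spec_member_of_nth_fib_lists (listA : List Int) (listB : List Int) (needle : List Int) (out : Bool) : Prop := out = member_of_nth_fib_lists_alt listA listB needle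
instance (listA : List Int) (listB : List Int) (needle : List Int) (out : Bool) : Decidable (Spec_member_of_nth_fib_lists listA listB needle out) := by unfold Spec_member_of_nth_fib_lists; infer_instance

-- ===== CLAIM (what is proved, stated in full; the proofs are below) =====
def Claim_equal_member_of_nth_fib_lists : Prop := ∀ (listA : List Int) (listB : List Int) (needle : List Int), Dom_member_of_nth_fib_lists listA listB needle → Spec_member_of_nth_fib_lists listA listB needle (member_of_nth_fib_lists listA listB needle)

-- ===== LEMMAS AND PROOFS =====

-- gfib k = the Fibonacci pair after k advances from (listA, listB)
def gfib (listA listB : List Int) : Nat → List Int × List Int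
  | 0 => (listA, listB)
  | k + 1 => ((gfib listA listB k).2, (gfib listA listB k).1 ++ (gfib listA listB k).2)

theorem foldA_state (listA listB : List Int) (k : Nat) :
    (PySem.List.pyRange 2 ((k : Int) + 3) 1).foldl
      (fun (st : List Int × List Int × List Int) _ =>
        let temp := st.1 ++ st.2.1
        (st.2.1, temp, temp))
      (listA, listB, ([] : List Int))
    = ((gfib listA listB (k + 1)).1, (gfib listA listB (k + 1)).2, (gfib listA listB (k + 1)).2) := by
  induction k with
  | zero =>
    rw [show ((0 : Nat) : Int) + 3 = 2 + 1 by norm_num,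
        PySem.List.pyRange_one_singleton]
    simp [gfib]
  | succ j ih =>
    rw [show ((j + 1 : Nat) : Int) + 3 = ((j : Int) + 3) + 1 by push_cast; ring,
        PySem.List.pyRange_one_succ_right (by omega), List.foldl_append, ih]
    simp [gfib]

theorem nth_eq_gfib (listA listB : List Int) (k : Nat) :
    nth_fib_lists listA listB ((k : Int) + 3) = (gfib listA listB (k + 1)).2 := by
  unfold nth_fib_lists
  rw [if_neg (by omega), if_neg (by omega), if_neg (by omega)]
  simpa using congrArg (fun s => s.2.2) (foldA_state listA listB k)

theorem loop_eq (listA listB needle : List Int) (fuel : Nat) :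
    ∀ (m : Nat) (answer : List Int),
      memberLoopA listA listB needle fuel answer ((m : Int) + 1)
      = memberLoopB listA listB needle fuel answer
          (gfib listA listB (m - 2)).1 (gfib listA listB (m - 2)).2 ((m : Int) + 1) := by
  induction fuel with
  | zero => intro m answer; rfl
  | succ f ih =>
    intro m answer
    by_cases hne : answer ≠ needle
    · match m with
      | 0 =>
        simp only [memberLoopA, memberLoopB, if_pos hne, Nat.cast_zero]
        rw [show nth_fib_lists listA listB (0 + 1) = listA by unfold nth_fib_lists; norm_num,
            if_pos (show (0 : Int) + 1 = 1 by norm_num)]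
        split
        · rfl
        · simpa using ih 1 listA
      | 1 =>
        simp only [memberLoopA, memberLoopB, if_pos hne, Nat.cast_one]
        rw [show nth_fib_lists listA listB (1 + 1) = listB by unfold nth_fib_lists; norm_num,
            if_neg (show ¬ (1 : Int) + 1 = 1 by norm_num),
            if_pos (show (1 : Int) + 1 = 2 by norm_num)]
        split
        · rfl
        · simpa [gfib] using ih 2 listB
      | j + 2 =>
        simp only [memberLoopA, memberLoopB, if_pos hne]
        rw [show ((j + 2 : Nat) : Int) + 1 = (j : Int) + 3 by push_cast; ring,
            nth_eq_gfib,
            if_neg (show ¬ (j : Int) + 3 = 1 by omega),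
            if_neg (show ¬ (j : Int) + 3 = 2 by omega)]
        have hst : (gfib listA listB (j + 2 - 2)).1 ++ (gfib listA listB (j + 2 - 2)).2
            = (gfib listA listB (j + 1)).2 := by simp [gfib]
        have hfst : (gfib listA listB (j + 2 - 2)).2 = (gfib listA listB (j + 1)).1 := by
          simp [gfib]
        rw [hst, hfst]
        split
        · rfl
        · have := ih (j + 3) ((gfib listA listB (j + 1)).2)
          rw [show ((j + 3 : Nat) : Int) + 1 = ((j : Int) + 3) + 1 by push_cast; ring] at this
          simpa using this
    · simp only [memberLoopA, memberLoopB, if_neg hne]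

-- ===== VERDICT (by name: the statement is the Claim_ definition above) =====
theorem member_of_nth_fib_lists_spec : Claim_equal_member_of_nth_fib_lists := by
  intro listA listB needle _
  unfold Spec_member_of_nth_fib_lists member_of_nth_fib_lists member_of_nth_fib_lists_alt
  simpa using loop_eq listA listB needle (needle.length + 10) 0 []
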